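-- pv_equiv track=rewrite | github.com/palpen/algorithmic_toolbox_assignments | 04_dynamic_programming/knapsack.py | slow_knapsack_wo_rep
-- ===== SOURCE A (Python) =====
-- import itertools
-- import bisect
--
-- def slow_knapsack_wo_rep(W, wt):
--     """
--     Slow implementation of the knapsack without replacement algorithm. Takes all combinations of list of weights, wt, sum each of them, and take the maxium that is less than the knapsack weight, W.
--
--     input:
--     W: knapsack capacity
--     wt: list containing the weights of each pieces of gold
--
--     output:
--     maximum weigt of gold that can fit in the knapsack with capacity, W.
--     """
--
--     combs = []
--
--     # create all possible combinations of items in list wt (O(2^n))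
--     for i in range(len(wt) + 1):
--
--         num_combs = [list(x) for x in itertools.combinations(wt, i)]
--         combs.extend(num_combs)
--
--     # get sum of items in each combination in combs and sort them
--     combs_sum = [sum(x) for x in combs]
--     combs_sum.sort()
--
--     # locate insertion point for W that preserves sorted order of combs_sum
--     index = bisect.bisect(combs_sum, W)
--
--     # return
--     return combs_sum[index - 1]
-- ===== SOURCE B (Python) =====
-- import bisect
--
--
-- def _subset_sums(ws):
--     sums = [0]
--     for w in ws:
--         sums += [s + w for s in sums]
--     return sums
--
--
-- def slow_knapsack_wo_rep(W, wt):
--     """Meet-in-the-middle: enumerate subset sums of each half, sort one half,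
--     and combine with binary search.  Raises ValueError when no subset sum is <= W."""
--     half = len(wt) // 2
--     left = _subset_sums(wt[:half])
--     right = sorted(_subset_sums(wt[half:]))
--     cands = []
--     for s in left:
--         i = bisect.bisect_right(right, W - s)
--         if i != 0:
--             cands.append(s + right[i - 1])
--     return max(cands)
-- ===== Notes on version B (the rewrite author's own statement) =====
-- stated objective: faster
-- what changed: Replaces full enumeration of all 2^n combinations followed by a global sort and bisect with meet-in-the-middle: subset sums of each half are enumerated by iterative doubling, one half is sorted, and the best pair not exceeding W is found by binary search; intended as faster (O(2^(n/2)) vs O(2^n) states, measured 349x at n=16, though both are exponential and neither finishes at n=64).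
-- outside the precondition, e.g. on slow_knapsack_wo_rep(-1, []): A returns 0, B raises ValueError
import Mathlib
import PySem

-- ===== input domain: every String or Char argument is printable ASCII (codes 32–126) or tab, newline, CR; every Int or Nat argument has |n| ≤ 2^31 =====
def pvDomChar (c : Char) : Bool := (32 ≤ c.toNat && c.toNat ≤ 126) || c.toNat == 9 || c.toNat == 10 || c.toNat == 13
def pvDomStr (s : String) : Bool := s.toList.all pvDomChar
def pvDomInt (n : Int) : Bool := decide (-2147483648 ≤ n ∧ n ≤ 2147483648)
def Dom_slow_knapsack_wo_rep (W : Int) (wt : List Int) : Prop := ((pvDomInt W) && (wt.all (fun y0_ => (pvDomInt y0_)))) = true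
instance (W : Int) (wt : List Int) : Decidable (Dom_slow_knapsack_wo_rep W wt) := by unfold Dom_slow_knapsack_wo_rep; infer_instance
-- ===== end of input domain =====

-- B replaces A's full 2^n-combination enumeration + global sort + bisect by meet-in-the-middle
-- (subset sums of each half, one half sorted, best pair by binary search): intended as faster,
-- O(2^(n/2)) vs O(2^n) states (measured 349x at n=16; both are exponential).


-- ===== PORT A =====
-- itertools.combinations is PySem.List.combinations ([list(x) for x in …] is the identity on our
-- lists); list.sort() is PySem.List.sorted; bisect.bisect is PySem.List.bisectRight.
-- combs_sum is never empty (it contains the empty combination's sum 0) and index-1 is in [-1, len-1],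
-- so combs_sum[index-1] never raises; .getD 0 is never reached.
def slow_knapsack_wo_rep (W : Int) (wt : List Int) : Int :=
  let combs := (List.range (wt.length + 1)).foldl
    (fun acc i => acc ++ PySem.List.combinations wt i) []
  let combs_sum := combs.map (fun x => x.sum)
  let sorted_sums := PySem.List.sorted combs_sum (fun s => s) false
  let index := PySem.List.bisectRight sorted_sums W
  (PySem.List.pyGet? sorted_sums ((index : Int) - 1)).getD 0

-- ===== PORT B =====
-- port of Source B's _subset_sums: sums = [0]; for w in ws: sums += [s + w for s in sums]
def pySubsetSums (ws : List Int) : List Int :=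
  ws.foldl (fun sums w => sums ++ sums.map (fun s => s + w)) [0]

-- len(wt)//2 on a Nat length is exact; max(cands) raises ValueError iff cands == [] (outside Pre_),
-- ported as .getD 0 there.
def slow_knapsack_wo_rep_alt (W : Int) (wt : List Int) : Int :=
  let half : Nat := wt.length / 2
  let left := pySubsetSums (PySem.List.slice wt none (some (half : Int)))
  let right := PySem.List.sorted (pySubsetSums (PySem.List.slice wt (some (half : Int)) none)) (fun s => s) false
  let cands := left.foldl (fun acc s =>
    if PySem.List.bisectRight right (W - s) ≠ 0 then
      acc ++ [s + (PySem.List.pyGet? right ((PySem.List.bisectRight right (W - s) : Int) - 1)).getD 0]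
    else acc) []
  (PySem.List.max? cands (fun c => c)).getD 0

-- ===== PRECONDITION & SPEC =====
-- Pre_ excludes exactly the inputs with no subset sum ≤ W (possible only when W is below the sum of
-- the negative weights, the minimum subset sum): there A's combs_sum[index-1] wraps around to the
-- last element and accidentally returns the MAXIMUM subset sum, while B naturally raises ValueError.
def Pre_slow_knapsack_wo_rep (W : Int) (wt : List Int) : Prop :=
  (wt.filter (fun w => decide (w < 0))).sum ≤ W
instance (W : Int) (wt : List Int) : Decidable (Pre_slow_knapsack_wo_rep W wt) := by
  unfold Pre_slow_knapsack_wo_rep; infer_instance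

def pvWitness_slow_knapsack_wo_rep : Int × List Int := (10, [3, -4, 7])

def Spec_slow_knapsack_wo_rep (W : Int) (wt : List Int) (out : Int) : Prop := out = slow_knapsack_wo_rep_alt W wt
instance (W : Int) (wt : List Int) (out : Int) : Decidable (Spec_slow_knapsack_wo_rep W wt out) := by unfold Spec_slow_knapsack_wo_rep; infer_instance

-- ===== CLAIM (what is proved, stated in full; the proofs are below) =====
def Claim_equal_slow_knapsack_wo_rep : Prop := ∀ (W : Int) (wt : List Int), Dom_slow_knapsack_wo_rep W wt → Pre_slow_knapsack_wo_rep W wt → Spec_slow_knapsack_wo_rep W wt (slow_knapsack_wo_rep W wt)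

-- ===== LEMMAS AND PROOFS =====

-- r is the greatest subset sum of wt not exceeding W
def IsBest (W : Int) (wt : List Int) (r : Int) : Prop :=
  (∃ xs : List Int, xs.Sublist wt ∧ xs.sum = r) ∧ r ≤ W ∧
  ∀ xs : List Int, xs.Sublist wt → xs.sum ≤ W → xs.sum ≤ r

theorem isBest_unique {W : Int} {wt : List Int} {r1 r2 : Int}
    (h1 : IsBest W wt r1) (h2 : IsBest W wt r2) : r1 = r2 := by
  obtain ⟨⟨xs1, hs1, he1⟩, hle1, hmax1⟩ := h1
  obtain ⟨⟨xs2, hs2, he2⟩, hle2, hmax2⟩ := h2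
  have ha := hmax2 xs1 hs1 (by omega)
  have hb := hmax1 xs2 hs2 (by omega)
  omega

theorem bisect_ne_zero (l : List Int) (hp : l.Pairwise (· ≤ ·)) (cap x : Int)
    (hx : x ∈ l) (hxle : x ≤ cap) : PySem.List.bisectRight l cap ≠ 0 := by
  obtain ⟨j, hj, rfl⟩ := List.mem_iff_getElem.mp hx
  obtain ⟨hle, hlo, hhi⟩ := PySem.List.bisectRight_spec l cap hp
  intro h0
  exact absurd hxle (not_le.mpr (hhi j hj (by omega)))

theorem bisect_get (l : List Int) (hp : l.Pairwise (· ≤ ·)) (cap : Int)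
    (hne : PySem.List.bisectRight l cap ≠ 0) :
    ∃ r, PySem.List.pyGet? l ((PySem.List.bisectRight l cap : Int) - 1) = some r ∧
      r ∈ l ∧ r ≤ cap ∧ ∀ y ∈ l, y ≤ cap → y ≤ r := by
  obtain ⟨hle, hlo, hhi⟩ := PySem.List.bisectRight_spec l cap hp
  set i := PySem.List.bisectRight l cap with hi
  have h1 : 1 ≤ i := Nat.one_le_iff_ne_zero.mpr hne
  have hlt : i - 1 < l.length := by omega
  have hcast : (i : Int) - 1 = ((i - 1 : Nat) : Int) := by omega
  refine ⟨l[i-1], ?_, List.getElem_mem hlt, hlo (i-1) hlt (by omega), ?_⟩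
  · rw [hcast, PySem.List.pyGet?_natCast, List.getElem?_eq_getElem hlt]
  · intro y hy hycap
    obtain ⟨j, hj, rfl⟩ := List.mem_iff_getElem.mp hy
    have hji : j < i := by
      by_contra hge
      exact absurd hycap (not_le.mpr (hhi j hj (by omega)))
    rcases Nat.lt_or_ge j (i-1) with h2 | h2
    · exact List.pairwise_iff_getElem.mp hp j (i-1) hj hlt h2
    · have hje : j = i - 1 := by omega
      subst hje; exact le_rfl

theorem mem_foldl_subsums (ws : List Int) (acc : List Int) (s : Int) :
    (s ∈ ws.foldl (fun sums w => sums ++ sums.map (fun t => t + w)) acc ↔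
      ∃ a ∈ acc, ∃ xs : List Int, xs.Sublist ws ∧ s = a + xs.sum) := by
  induction ws generalizing acc with
  | nil =>
    simp only [List.foldl_nil, List.sublist_nil]
    constructor
    · intro h; exact ⟨s, h, [], rfl, by simp⟩
    · rintro ⟨a, ha, xs, rfl, rfl⟩; simpa using ha
  | cons w t ih =>
    rw [List.foldl_cons, ih]
    constructor
    · rintro ⟨a, ha, xs, hxs, rfl⟩
      rcases List.mem_append.mp ha with h | h
      · exact ⟨a, h, xs, hxs.cons w, rfl⟩
      · obtain ⟨a0, ha0, rfl⟩ := List.mem_map.mp h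
        exact ⟨a0, ha0, w :: xs, hxs.cons₂ w, by simp [List.sum_cons]; ring⟩
    · rintro ⟨a, ha, xs, hxs, rfl⟩
      rcases List.sublist_cons_iff.mp hxs with h | ⟨r, rfl, hr⟩
      · exact ⟨a, List.mem_append_left _ ha, xs, h, rfl⟩
      · exact ⟨a + w, List.mem_append_right _ (List.mem_map.mpr ⟨a, ha, rfl⟩), r, hr,
          by simp [List.sum_cons]; ring⟩

theorem mem_pySubsetSums (ws : List Int) (s : Int) :
    s ∈ pySubsetSums ws ↔ ∃ xs : List Int, xs.Sublist ws ∧ xs.sum = s := by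
  rw [pySubsetSums, mem_foldl_subsums]
  constructor
  · rintro ⟨a, ha, xs, hxs, rfl⟩
    simp only [List.mem_singleton] at ha
    exact ⟨xs, hxs, by omega⟩
  · rintro ⟨xs, hxs, rfl⟩
    exact ⟨0, by simp, xs, hxs, by omega⟩

theorem mem_combs_sum (wt : List Int) (s : Int) :
    (s ∈ ((List.range (wt.length + 1)).foldl
        (fun acc i => acc ++ PySem.List.combinations wt i) []).map (fun x => x.sum)) ↔
      ∃ xs : List Int, xs.Sublist wt ∧ xs.sum = s := by
  rw [PySem.List.foldl_append_eq_flatMap]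
  simp only [List.nil_append, List.mem_map, List.mem_flatMap, List.mem_range,
    PySem.List.mem_combinations_iff]
  constructor
  · rintro ⟨c, ⟨i, hi, hc, hlen⟩, rfl⟩; exact ⟨c, hc, rfl⟩
  · rintro ⟨xs, hxs, rfl⟩
    exact ⟨xs, ⟨xs.length, by have := hxs.length_le; omega, hxs, rfl⟩, rfl⟩

theorem A_isBest (W : Int) (wt : List Int) (hpre : Pre_slow_knapsack_wo_rep W wt) :
    IsBest W wt (slow_knapsack_wo_rep W wt) := by
  unfold slow_knapsack_wo_rep
  show IsBest W wt ((PySem.List.pyGet? (PySem.List.sorted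
    (((List.range (wt.length + 1)).foldl
      (fun acc i => acc ++ PySem.List.combinations wt i) []).map (fun x => x.sum))
    (fun s => s) false) ((PySem.List.bisectRight (PySem.List.sorted
    (((List.range (wt.length + 1)).foldl
      (fun acc i => acc ++ PySem.List.combinations wt i) []).map (fun x => x.sum))
    (fun s => s) false) W : Int) - 1)).getD 0)
  set sortedL := PySem.List.sorted
    (((List.range (wt.length + 1)).foldl
      (fun acc i => acc ++ PySem.List.combinations wt i) []).map (fun x => x.sum))
    (fun s => s) false with hsL
  have hmem : ∀ s : Int, s ∈ sortedL ↔ ∃ xs : List Int, xs.Sublist wt ∧ xs.sum = s := by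
    intro s; rw [hsL, PySem.List.mem_sorted, mem_combs_sum]
  have hpair : sortedL.Pairwise (· ≤ ·) := PySem.List.sorted_pairwise _ _
  have hxmem : (wt.filter (fun w => decide (w < 0))).sum ∈ sortedL :=
    (hmem _).mpr ⟨_, List.filter_sublist, rfl⟩
  have hne := bisect_ne_zero sortedL hpair W _ hxmem hpre
  obtain ⟨r, hget, hrmem, hrle, hrmax⟩ := bisect_get sortedL hpair W hne
  rw [hget]
  exact ⟨(hmem r).mp hrmem, hrle, fun xs hxs hle => hrmax _ ((hmem _).mpr ⟨xs, hxs, rfl⟩) hle⟩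

theorem B_isBest (W : Int) (wt : List Int) (hpre : Pre_slow_knapsack_wo_rep W wt) :
    IsBest W wt (slow_knapsack_wo_rep_alt W wt) := by
  unfold slow_knapsack_wo_rep_alt
  replace hpre : (wt.filter (fun w => decide (w < 0))).sum ≤ W := hpre
  show IsBest W wt ((PySem.List.max? (List.foldl
      (fun acc s =>
        if PySem.List.bisectRight (PySem.List.sorted (pySubsetSums (PySem.List.slice wt (some ((wt.length / 2 : Nat) : Int)) none)) (fun s => s) false) (W - s) ≠ 0 then
          acc ++ [s + (PySem.List.pyGet? (PySem.List.sorted (pySubsetSums (PySem.List.slice wt (some ((wt.length / 2 : Nat) : Int)) none)) (fun s => s) false)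
            ((PySem.List.bisectRight (PySem.List.sorted (pySubsetSums (PySem.List.slice wt (some ((wt.length / 2 : Nat) : Int)) none)) (fun s => s) false) (W - s) : Int) - 1)).getD 0]
        else acc)
      [] (pySubsetSums (PySem.List.slice wt none (some ((wt.length / 2 : Nat) : Int))))) (fun c => c)).getD 0)
  rw [PySem.List.slice_to_natCast, PySem.List.slice_from_natCast]
  set h := wt.length / 2 with hh
  set L := pySubsetSums (wt.take h) with hL
  set R := PySem.List.sorted (pySubsetSums (wt.drop h)) (fun s => s) false with hR
  have hRpair : R.Pairwise (· ≤ ·) := PySem.List.sorted_pairwise _ _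
  have hLmem : ∀ s : Int, s ∈ L ↔ ∃ xs : List Int, xs.Sublist (wt.take h) ∧ xs.sum = s := by
    intro s; rw [hL, mem_pySubsetSums]
  have hRmem : ∀ s : Int, s ∈ R ↔ ∃ xs : List Int, xs.Sublist (wt.drop h) ∧ xs.sum = s := by
    intro s; rw [hR, PySem.List.mem_sorted, mem_pySubsetSums]
  -- the loop is a filtered map
  rw [PySem.List.foldl_append_ite
    (p := fun s => PySem.List.bisectRight R (W - s) ≠ 0)
    (f := fun s => s + (PySem.List.pyGet? R ((PySem.List.bisectRight R (W - s) : Int) - 1)).getD 0)]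
  set pdec : Int → Bool := fun s => decide (PySem.List.bisectRight R (W - s) ≠ 0) with hpdec
  set f : Int → Int :=
    fun s => s + (PySem.List.pyGet? R ((PySem.List.bisectRight R (W - s) : Int) - 1)).getD 0 with hf
  -- properties of each candidate
  have hcand : ∀ s : Int, s ∈ L → PySem.List.bisectRight R (W - s) ≠ 0 →
      (∃ xs : List Int, xs.Sublist wt ∧ xs.sum = f s) ∧ f s ≤ W ∧
      ∀ b ∈ R, b ≤ W - s → s + b ≤ f s := by
    intro s hsL hne
    obtain ⟨r, hget, hrR, hrle, hrmax⟩ := bisect_get R hRpair (W - s) hne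
    have hfs : f s = s + r := by simp only [hf, hget, Option.getD_some]
    obtain ⟨xs, hxs, hxsum⟩ := (hLmem s).mp hsL
    obtain ⟨ys, hys, hysum⟩ := (hRmem r).mp hrR
    refine ⟨⟨xs ++ ys, ?_, by simp [hxsum, hysum, hfs]⟩, by omega, ?_⟩
    · have := List.Sublist.append hxs hys
      rwa [List.take_append_drop] at this
    · intro b hbR hble
      have := hrmax b hbR hble
      omega
  -- decomposing any sublist of wt across the two halves
  have hsplit : ∀ xs : List Int, xs.Sublist wt →
      ∃ ys zs : List Int, xs = ys ++ zs ∧ ys.Sublist (wt.take h) ∧ zs.Sublist (wt.drop h) := by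
    intro xs hxs
    rw [← List.take_append_drop h wt] at hxs
    exact List.sublist_append_iff.mp hxs
  -- nonemptiness of cands via the minimum subset sum
  obtain ⟨ys0, zs0, hsplit0, hys0, hzs0⟩ :=
    hsplit (wt.filter (fun w => decide (w < 0))) List.filter_sublist
  have hs0L : ys0.sum ∈ L := (hLmem _).mpr ⟨ys0, hys0, rfl⟩
  have hz0R : zs0.sum ∈ R := (hRmem _).mpr ⟨zs0, hzs0, rfl⟩
  have hsum0 : ys0.sum + zs0.sum ≤ W := by
    have : (wt.filter (fun w => decide (w < 0))).sum = ys0.sum + zs0.sum := by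
      rw [hsplit0, List.sum_append]
    omega
  have hne0 : PySem.List.bisectRight R (W - ys0.sum) ≠ 0 :=
    bisect_ne_zero R hRpair _ _ hz0R (by omega)
  have hmemfil : ys0.sum ∈ L.filter pdec :=
    List.mem_filter.mpr ⟨hs0L, by simp [hpdec, hne0]⟩
  -- max? returns some m
  have hcne : ([] : List Int) ++ (L.filter pdec).map f ≠ [] := by
    simp only [List.nil_append, ne_eq, List.map_eq_nil_iff]
    intro hnil
    rw [hnil] at hmemfil
    exact absurd hmemfil (List.not_mem_nil)
  obtain ⟨m, hm⟩ : ∃ m, PySem.List.max? (([] : List Int) ++ (L.filter pdec).map f) (fun c => c) = some m := by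
    cases hq : PySem.List.max? (([] : List Int) ++ (L.filter pdec).map f) (fun c => c) with
    | none => exact absurd ((PySem.List.max?_eq_none_iff _ _).mp hq) hcne
    | some m => exact ⟨m, rfl⟩
  rw [hm]; simp only [Option.getD_some]
  -- m itself is a valid candidate
  obtain ⟨sm, ⟨hsmL, hsmp⟩, hsmf⟩ :=
    (by simpa using PySem.List.max?_mem hm : ∃ a, (a ∈ L ∧ pdec a = true) ∧ f a = m)
  have hsmne : PySem.List.bisectRight R (W - sm) ≠ 0 := by simpa [hpdec] using hsmp
  obtain ⟨hmmem, hmle, _⟩ := hcand sm hsmL hsmne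
  refine ⟨by simpa [hsmf] using hmmem, by simpa [hsmf] using hmle, ?_⟩
  -- maximality
  intro xs hxs hxsle
  obtain ⟨ys, zs, rfl, hys, hzs⟩ := hsplit xs hxs
  have hsL : ys.sum ∈ L := (hLmem _).mpr ⟨ys, hys, rfl⟩
  have hzR : zs.sum ∈ R := (hRmem _).mpr ⟨zs, hzs, rfl⟩
  rw [List.sum_append] at hxsle ⊢
  have hne1 : PySem.List.bisectRight R (W - ys.sum) ≠ 0 :=
    bisect_ne_zero R hRpair _ _ hzR (by omega)
  obtain ⟨_, _, hge⟩ := hcand ys.sum hsL hne1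
  have hfc : f ys.sum ∈ ([] : List Int) ++ (L.filter pdec).map f := by
    simp only [List.nil_append]
    exact List.mem_map.mpr ⟨ys.sum, List.mem_filter.mpr ⟨hsL, by simp [hpdec, hne1]⟩, rfl⟩
  have hfm : f ys.sum ≤ m := PySem.List.max?_isMax hm _ hfc
  have := hge zs.sum hzR (by omega)
  omega

-- ===== VERDICT (by name: the statement is the Claim_ definition above) =====
theorem slow_knapsack_wo_rep_spec : Claim_equal_slow_knapsack_wo_rep := by
  intro W wt _ hpre
  exact isBest_unique (A_isBest W wt hpre) (B_isBest W wt hpre)
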